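-- pv_equiv track=rewrite | github.com/danmedani/euler | 171/171_3.py | get_all_digit_number
-- ===== SOURCE A (Python) =====
-- from typing import Dict
--
-- def get_all_digit_number(digit_map: Dict[int, int]) -> int:
-- 	val = 0
-- 	ten_pow = 1
-- 	for digit, digit_count in digit_map.items():
-- 		while digit_count > 0:
-- 			val += (ten_pow * digit)
-- 			ten_pow *= 10
-- 			digit_count -= 1
-- 	return val
-- ===== SOURCE B (Python) =====
-- def get_all_digit_number(digit_map):
-- 	val = 0
-- 	ten_pow = 1
-- 	for digit, digit_count in digit_map.items():
-- 		if digit_count > 0: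
-- 			val += digit * ten_pow * (10 ** digit_count - 1) // 9
-- 			ten_pow *= 10 ** digit_count
-- 	return val
-- ===== Notes on version B (the rewrite author's own statement) =====
-- stated objective: alternative
-- what changed: Replaces A's inner while-loop that appends one digit position at a time with a closed-form repunit formula: each (digit, count) entry contributes digit * ten_pow * (10**count - 1) // 9 in one arithmetic step.
import Mathlib
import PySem

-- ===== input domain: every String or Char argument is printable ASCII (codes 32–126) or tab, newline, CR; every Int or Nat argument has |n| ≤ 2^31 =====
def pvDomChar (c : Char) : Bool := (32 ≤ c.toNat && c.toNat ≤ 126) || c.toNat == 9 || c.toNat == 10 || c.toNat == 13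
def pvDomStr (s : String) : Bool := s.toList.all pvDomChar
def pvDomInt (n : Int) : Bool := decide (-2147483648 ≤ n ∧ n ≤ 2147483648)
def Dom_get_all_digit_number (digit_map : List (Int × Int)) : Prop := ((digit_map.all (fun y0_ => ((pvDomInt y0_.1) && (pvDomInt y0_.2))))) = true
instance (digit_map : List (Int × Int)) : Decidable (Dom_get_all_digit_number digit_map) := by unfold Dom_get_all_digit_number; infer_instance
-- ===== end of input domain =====

-- B replaces A's inner while-loop (one digit position per iteration) with a closed-form
-- repunit formula per map entry (same cost overall; bignum arithmetic dominates); equal return value on every input.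

-- ===== PORT A =====
-- inner 'while digit_count > 0' loop of A, on state (val, ten_pow)
def pvWhileA (val ten_pow digit cnt : Int) : Int × Int :=
  if cnt > 0 then pvWhileA (val + ten_pow * digit) (ten_pow * 10) digit (cnt - 1)
  else (val, ten_pow)
termination_by cnt.toNat
decreasing_by omega

def get_all_digit_number (digit_map : List (Int × Int)) : Int :=
  (digit_map.foldl (fun s p => pvWhileA s.1 s.2 p.1 p.2) (0, 1)).1

-- ===== PORT B =====
def get_all_digit_number_alt (digit_map : List (Int × Int)) : Int :=
  (digit_map.foldl (fun s p =>
      if p.2 > 0 then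
        (s.1 + PySem.Int.floordiv (p.1 * s.2 * (10 ^ p.2.toNat - 1)) 9, s.2 * 10 ^ p.2.toNat)
      else s) ((0 : Int), (1 : Int))).1

-- ===== PRECONDITION & SPEC =====
def Spec_get_all_digit_number (digit_map : List (Int × Int)) (out : Int) : Prop := out = get_all_digit_number_alt digit_map
instance (digit_map : List (Int × Int)) (out : Int) : Decidable (Spec_get_all_digit_number digit_map out) := by unfold Spec_get_all_digit_number; infer_instance

-- ===== CLAIM (what is proved, stated in full; the proofs are below) =====
def Claim_equal_get_all_digit_number : Prop := ∀ (digit_map : List (Int × Int)), Dom_get_all_digit_number digit_map → Spec_get_all_digit_number digit_map (get_all_digit_number digit_map)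

-- ===== LEMMAS AND PROOFS =====

theorem pv_nine_dvd (n : Nat) : (9 : Int) ∣ 10 ^ n - 1 := by
  induction n with
  | zero => simp
  | succ m ih =>
    obtain ⟨k, hk⟩ := ih
    exact ⟨10 * k + 1, by rw [pow_succ]; linarith⟩

theorem pv_fd_nine (m : Int) : PySem.Int.floordiv (9 * m) 9 = m := by
  rw [PySem.Int.floordiv_eq_ediv_of_pos (by norm_num)]
  exact Int.mul_ediv_cancel_left m (by norm_num)

theorem pvWhileA_closed : ∀ (n : Nat) (c : Int), c.toNat = n → ∀ (val tp d : Int),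
    pvWhileA val tp d c =
      (val + PySem.Int.floordiv (d * tp * (10 ^ n - 1)) 9, tp * 10 ^ n) := by
  intro n
  induction n with
  | zero =>
    intro c hc val tp d
    rw [pvWhileA]
    have : ¬ c > 0 := by omega
    simp [this]
  | succ m ih =>
    intro c hc val tp d
    rw [pvWhileA]
    have hcpos : c > 0 := by omega
    simp only [hcpos, if_pos]
    rw [ih (c - 1) (by omega)]
    obtain ⟨k, hk⟩ := pv_nine_dvd m
    have h1 : d * (tp * 10) * (10 ^ m - 1) = 9 * (d * tp * 10 * k) := by
      rw [hk]; ring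
    have h2 : d * tp * (10 ^ (m + 1) - 1) = 9 * (d * tp * (10 * k + 1)) := by
      have : (10 : Int) ^ (m + 1) - 1 = 9 * (10 * k + 1) := by
        rw [pow_succ]
        have : (10 : Int) ^ m = 9 * k + 1 := by linarith
        rw [this]; ring
      rw [this]; ring
    rw [h1, h2, pv_fd_nine, pv_fd_nine, pow_succ]
    exact Prod.ext (by ring) (by ring)

-- the two fold steps agree on every state and entry
theorem pv_step_eq (s : Int × Int) (p : Int × Int) :
    pvWhileA s.1 s.2 p.1 p.2 =
      (if p.2 > 0 then
        (s.1 + PySem.Int.floordiv (p.1 * s.2 * (10 ^ p.2.toNat - 1)) 9, s.2 * 10 ^ p.2.toNat)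
      else s) := by
  rw [pvWhileA_closed p.2.toNat p.2 rfl]
  by_cases h : p.2 > 0
  · simp [h]
  · have : p.2.toNat = 0 := by omega
    simp [h, this, PySem.Int.floordiv]

-- ===== VERDICT (by name: the statement is the Claim_ definition above) =====
theorem get_all_digit_number_spec : Claim_equal_get_all_digit_number := by
  intro digit_map _
  unfold Spec_get_all_digit_number get_all_digit_number get_all_digit_number_alt
  have : ∀ (l : List (Int × Int)) (s : Int × Int),
      l.foldl (fun s p => pvWhileA s.1 s.2 p.1 p.2) s =
      l.foldl (fun s p =>
        if p.2 > 0 then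
          (s.1 + PySem.Int.floordiv (p.1 * s.2 * (10 ^ p.2.toNat - 1)) 9, s.2 * 10 ^ p.2.toNat)
        else s) s := by
    intro l
    induction l with
    | nil => intro s; rfl
    | cons p t ih => intro s; simp only [List.foldl_cons, pv_step_eq, ih]
  rw [this]
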